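-- pv_equiv track=rewrite | github.com/jsboigeEpita/2025-Epita-Intelligence-Symbolique | argumentation_analysis/agents/core/governance/social_choice.py | copeland
-- ===== SOURCE A (Python) =====
-- from typing import Dict, List, Optional, Tuple
--
-- def copeland(
--     ballots: List[List[str]],
--     options: List[str],
-- ) -> Tuple[str, Dict[str, int]]:
--     """Copeland's method: pairwise majority wins minus losses.
--
--     Args:
--         ballots: List of ranked preference lists.
--         options: All candidate options.
--
--     Returns:
--         (winner, copeland_scores)
--     """
--     scores = {o: 0 for o in options}
--     for a in options:
--         for b in options:
--             if a == b:
--                 continue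
--             a_wins = 0
--             b_wins = 0
--             for ballot in ballots:
--                 a_idx = ballot.index(a) if a in ballot else len(ballot)
--                 b_idx = ballot.index(b) if b in ballot else len(ballot)
--                 if a_idx < b_idx:
--                     a_wins += 1
--                 elif b_idx < a_idx:
--                     b_wins += 1
--             if a_wins > b_wins:
--                 scores[a] += 1
--             elif b_wins > a_wins:
--                 scores[a] -= 1
--     winner = max(scores, key=scores.get) if scores else None
--     return winner, scores
-- ===== SOURCE B (Python) =====
-- def copeland(
--     ballots,
--     options,
-- ):
--     """Copeland's method via a pairwise win matrix built in one pass over ballots.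
--
--     Each ballot is converted once to a rank dict (position of first occurrence,
--     absent options ranked last) and a win matrix wins[(a, b)] = number of times
--     a was ranked strictly above b is filled in that single pass; each option's
--     Copeland score is then tallied from the matrix, pair by pair.
--     """
--     wins = {}
--     for ballot in ballots:
--         n = len(ballot)
--         rank = {}
--         for i, o in enumerate(ballot):
--             if o not in rank:
--                 rank[o] = i
--         for a in options:
--             ra = rank.get(a, n)
--             for b in options:
--                 if a != b and ra < rank.get(b, n):
--                     wins[(a, b)] = wins.get((a, b), 0) + 1
--     scores = {o: 0 for o in options}
--     for a in options:
--         for b in options: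
--             if a == b:
--                 continue
--             d = wins.get((a, b), 0) - wins.get((b, a), 0)
--             if d > 0:
--                 scores[a] += 1
--             elif d < 0:
--                 scores[a] -= 1
--     winner = max(scores, key=scores.get) if scores else None
--     return winner, scores
-- ===== Notes on version B (the rewrite author's own statement) =====
-- stated objective: faster
-- what changed: A rescans the full ballot list (with per-ballot list.index calls and membership tests) for every ordered pair of options; B makes one pass over the ballots, converting each ballot once to a rank dict and filling a pairwise win matrix, then tallies each option's score from the matrix in a separate pass over option pairs, so the repeated per-pair ballot rescans disappear.
import Mathlib
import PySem

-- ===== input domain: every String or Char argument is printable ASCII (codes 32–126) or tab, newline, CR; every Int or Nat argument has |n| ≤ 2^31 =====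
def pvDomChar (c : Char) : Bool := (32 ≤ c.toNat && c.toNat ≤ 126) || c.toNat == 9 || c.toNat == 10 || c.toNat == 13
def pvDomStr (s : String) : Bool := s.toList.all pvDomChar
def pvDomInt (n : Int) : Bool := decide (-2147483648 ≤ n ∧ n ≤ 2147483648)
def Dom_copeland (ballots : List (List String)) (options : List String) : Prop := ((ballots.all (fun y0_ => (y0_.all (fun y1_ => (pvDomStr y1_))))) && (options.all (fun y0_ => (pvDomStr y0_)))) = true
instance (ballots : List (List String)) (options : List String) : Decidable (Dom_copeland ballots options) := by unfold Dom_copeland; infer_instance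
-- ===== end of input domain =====

-- B replaces A's per-pair rescans of all ballots by a pairwise win matrix built in
-- one pass over the ballots (each ballot converted once to a rank dict), then a
-- separate tally pass over the option pairs.

-- ===== PORT A =====
-- literal port of Source A: for each ordered pair of options, rescan all ballots
-- counting a's wins and b's wins with list.index / membership each time
def aPairStep (a b : String) (p : Int × Int) (ballot : List String) : Int × Int :=
  let aIdx : Nat := if a ∈ ballot then (PySem.List.index? ballot a).getD 0 else ballot.length
  let bIdx : Nat := if b ∈ ballot then (PySem.List.index? ballot b).getD 0 else ballot.length
  if aIdx < bIdx then (p.1 + 1, p.2)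
  else if bIdx < aIdx then (p.1, p.2 + 1)
  else p

def aInnerStep (ballots : List (List String)) (a : String) (sc : PySem.Dict String Int) (b : String) : PySem.Dict String Int :=
  if a = b then sc
  else
    let wl := ballots.foldl (aPairStep a b) (0, 0)
    if wl.1 > wl.2 then sc.modify a 0 (· + 1)
    else if wl.2 > wl.1 then sc.modify a 0 (· - 1)
    else sc

def aScores (ballots : List (List String)) (options : List String) : PySem.Dict String Int :=
  options.foldl (fun sc a => options.foldl (aInnerStep ballots a) sc)
    (options.foldl (fun d o => d.insert o 0) PySem.Dict.empty)

def copeland (ballots : List (List String)) (options : List String) : Option String × (List (String × Int)) :=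
  let scores := aScores ballots options
  -- max(scores, key=scores.get) if scores else None: max? already returns none on []
  (PySem.List.max? scores.keys (fun k => scores.getD k 0), scores.items)

-- ===== PORT B =====
-- literal port of Source B: per-ballot rank dicts (first occurrence), a pairwise win
-- matrix filled in one pass over the ballots, then the tally pass over pairs
def bRank (ballot : List String) : PySem.Dict String Int :=
  (PySem.List.enumerate ballot).foldl
    (fun r p => if r.contains p.2 then r else r.insert p.2 p.1) PySem.Dict.empty

def bPairStep (rank : PySem.Dict String Int) (n : Int) (a : String) (ra : Int)
    (w : PySem.Dict (String × String) Int) (b : String) : PySem.Dict (String × String) Int :=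
  if a ≠ b ∧ ra < rank.getD b n then w.insert (a, b) (w.getD (a, b) 0 + 1) else w

def bBallotStep (options : List String) (w : PySem.Dict (String × String) Int) (ballot : List String) :
    PySem.Dict (String × String) Int :=
  let n : Int := ballot.length
  let rank := bRank ballot
  options.foldl (fun w a => options.foldl (bPairStep rank n a (rank.getD a n)) w) w

def bScoreStep (wins : PySem.Dict (String × String) Int) (a : String)
    (sc : PySem.Dict String Int) (b : String) : PySem.Dict String Int :=
  if a = b then sc
  else
    let d := wins.getD (a, b) 0 - wins.getD (b, a) 0
    if d > 0 then sc.modify a 0 (· + 1)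
    else if d < 0 then sc.modify a 0 (· - 1)
    else sc

def bScores (ballots : List (List String)) (options : List String) : PySem.Dict String Int :=
  let wins := ballots.foldl (bBallotStep options) PySem.Dict.empty
  options.foldl (fun sc a => options.foldl (bScoreStep wins a) sc)
    (options.foldl (fun d o => d.insert o 0) PySem.Dict.empty)

def copeland_alt (ballots : List (List String)) (options : List String) : Option String × (List (String × Int)) :=
  let scores := bScores ballots options
  (PySem.List.max? scores.keys (fun k => scores.getD k 0), scores.items)

-- ===== PRECONDITION & SPEC =====
def Spec_copeland (ballots : List (List String)) (options : List String) (out : Option String × (List (String × Int))) : Prop := out = copeland_alt ballots options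
instance (ballots : List (List String)) (options : List String) (out : Option String × (List (String × Int))) : Decidable (Spec_copeland ballots options out) := by unfold Spec_copeland; infer_instance

-- ===== CLAIM (what is proved, stated in full; the proofs are below) =====
def Claim_equal_copeland : Prop := ∀ (ballots : List (List String)) (options : List String), Dom_copeland ballots options → Spec_copeland ballots options (copeland ballots options)

-- ===== LEMMAS AND PROOFS =====

-- Python's `ballot.index(a) if a in ballot else len(ballot)`
def pidx (ballot : List String) (a : String) : Nat :=
  if a ∈ ballot then (PySem.List.index? ballot a).getD 0 else ballot.length

-- number of ballots ranking a strictly before b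
def pcnt (ballots : List (List String)) (a b : String) : Nat :=
  (ballots.filter (fun bal => pidx bal a < pidx bal b)).length

-- Copeland increment of a against b (A's per-pair rescan result)
def sgn (ballots : List (List String)) (a b : String) : Int :=
  if pcnt ballots b a < pcnt ballots a b then 1
  else if pcnt ballots a b < pcnt ballots b a then -1
  else 0

theorem aPairStep_eq (a b : String) (p : Int × Int) (bal : List String) :
    aPairStep a b p bal =
      if pidx bal a < pidx bal b then (p.1 + 1, p.2)
      else if pidx bal b < pidx bal a then (p.1, p.2 + 1)
      else p := rfl

theorem pcnt_cons (bal : List String) (rest : List (List String)) (a b : String) :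
    pcnt (bal :: rest) a b = (if pidx bal a < pidx bal b then 1 else 0) + pcnt rest a b := by
  simp only [pcnt, List.filter_cons]
  split_ifs with h <;> simp_all <;> omega

theorem aPair_fold (a b : String) (ballots : List (List String)) (x y : Int) :
    ballots.foldl (aPairStep a b) (x, y) = (x + (pcnt ballots a b : Int), y + (pcnt ballots b a : Int)) := by
  induction ballots generalizing x y with
  | nil => simp [pcnt]
  | cons bal rest ih =>
    rw [List.foldl_cons, aPairStep_eq, pcnt_cons, pcnt_cons]
    split_ifs with h1 h2 <;> rw [ih] <;>
      refine Prod.ext ?_ ?_ <;> simp <;> push_cast <;> omega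

theorem aInnerStep_keys (ballots : List (List String)) (a : String) (sc : PySem.Dict String Int)
    (b : String) (ha : sc.contains a = true) : (aInnerStep ballots a sc b).keys = sc.keys := by
  have hk : ∀ f, (sc.modify a 0 f).keys = sc.keys := fun f => by
    rw [PySem.Dict.keys_modify]; exact PySem.Dict.keys_insert_of_contains _ _ ha
  unfold aInnerStep
  simp only [gt_iff_lt]
  split_ifs <;> simp [hk]

theorem aInnerStep_getD (ballots : List (List String)) (a : String) (sc : PySem.Dict String Int)
    (b k : String) :
    (aInnerStep ballots a sc b).getD k 0 =
      sc.getD k 0 + (if k = a ∧ b ≠ a then sgn ballots a b else 0) := by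
  unfold aInnerStep sgn
  rw [aPair_fold]
  by_cases hab : a = b
  · simp [hab]
  · have hba : b ≠ a := fun h => hab h.symm
    simp only [if_neg hab, hba, and_true]
    by_cases h1 : (0 : Int) + (pcnt ballots b a : Int) < 0 + (pcnt ballots a b : Int) <;>
      by_cases h2 : (0 : Int) + (pcnt ballots a b : Int) < 0 + (pcnt ballots b a : Int) <;>
      simp only [h1, h2, if_true, if_false, PySem.Dict.getD_modify, gt_iff_lt] <;>
      split_ifs <;> simp_all <;> omega

theorem bScoreStep_keys (wins : PySem.Dict (String × String) Int) (a : String)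
    (sc : PySem.Dict String Int) (b : String) (ha : sc.contains a = true) :
    (bScoreStep wins a sc b).keys = sc.keys := by
  have hk : ∀ f, (sc.modify a 0 f).keys = sc.keys := fun f => by
    rw [PySem.Dict.keys_modify]; exact PySem.Dict.keys_insert_of_contains _ _ ha
  unfold bScoreStep
  simp only [gt_iff_lt]
  split_ifs <;> simp [hk]

-- the increment B's tally pass applies for the pair (a, b)
def bsgn (wins : PySem.Dict (String × String) Int) (a b : String) : Int :=
  if wins.getD (a, b) 0 - wins.getD (b, a) 0 > 0 then 1
  else if wins.getD (a, b) 0 - wins.getD (b, a) 0 < 0 then -1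
  else 0

theorem bScoreStep_getD (wins : PySem.Dict (String × String) Int) (a : String)
    (sc : PySem.Dict String Int) (b k : String) :
    (bScoreStep wins a sc b).getD k 0 =
      sc.getD k 0 + (if k = a ∧ b ≠ a then bsgn wins a b else 0) := by
  unfold bScoreStep bsgn
  by_cases hab : a = b
  · simp [hab]
  · have hba : b ≠ a := fun h => hab h.symm
    simp only [if_neg hab, hba, and_true]
    by_cases h1 : wins.getD (a, b) 0 - wins.getD (b, a) 0 > 0 <;>
      by_cases h2 : wins.getD (a, b) 0 - wins.getD (b, a) 0 < 0 <;>
      simp only [h1, h2, if_true, if_false, PySem.Dict.getD_modify] <;>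
      split_ifs <;> simp_all <;> omega

-- generic: one outer iteration (the inner loop over l for a fixed a) adds
-- Σ_{b ∈ l, b ≠ a} g a b to scores[a] and keeps the keys
theorem genInner_fold (step : String → PySem.Dict String Int → String → PySem.Dict String Int)
    (g : String → String → Int) (a : String)
    (hkeys : ∀ sc b, sc.contains a = true → (step a sc b).keys = sc.keys)
    (hget : ∀ sc b k, (step a sc b).getD k 0 = sc.getD k 0 + (if k = a ∧ b ≠ a then g a b else 0))
    (l : List String) :
    ∀ (sc : PySem.Dict String Int), sc.contains a = true →
    (l.foldl (step a) sc).keys = sc.keys ∧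
    ∀ k, (l.foldl (step a) sc).getD k 0 =
      sc.getD k 0 + (if k = a then ((l.filter (fun b => b ≠ a)).map (g a)).sum else 0) := by
  induction l with
  | nil => intro sc _; simp
  | cons b l ih =>
    intro sc ha
    have hk := hkeys sc b ha
    have ha' : (step a sc b).contains a = true := by
      rw [PySem.Dict.contains_iff_mem_keys] at ha ⊢; rw [hk]; exact ha
    obtain ⟨ihk, ihg⟩ := ih (step a sc b) ha'
    refine ⟨by rw [List.foldl_cons, ihk, hk], ?_⟩
    intro k
    rw [List.foldl_cons, ihg k, hget sc b k]
    simp only [List.filter_cons]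
    by_cases hba : b = a <;> by_cases hk' : k = a <;> simp [hba, hk'] <;> omega

-- generic: the whole nested pass adds count(k) · Σ_{b ∈ options, b ≠ k} g k b
theorem genOuter_fold (step : String → PySem.Dict String Int → String → PySem.Dict String Int)
    (g : String → String → Int) (options : List String)
    (hkeys : ∀ a sc b, sc.contains a = true → (step a sc b).keys = sc.keys)
    (hget : ∀ a sc b k, (step a sc b).getD k 0 = sc.getD k 0 + (if k = a ∧ b ≠ a then g a b else 0))
    (l : List String) :
    ∀ (sc : PySem.Dict String Int), (∀ x ∈ l, sc.contains x = true) →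
    (l.foldl (fun sc a => options.foldl (step a) sc) sc).keys = sc.keys ∧
    ∀ k, (l.foldl (fun sc a => options.foldl (step a) sc) sc).getD k 0 =
      sc.getD k 0 + (l.count k : Int) * ((options.filter (fun b => b ≠ k)).map (g k)).sum := by
  induction l with
  | nil => intro sc _; simp
  | cons a l ih =>
    intro sc h
    have ha : sc.contains a = true := h a (List.mem_cons_self ..)
    obtain ⟨hk, hg⟩ := genInner_fold step g a (hkeys a) (hget a) options sc ha
    have h' : ∀ x ∈ l, (options.foldl (step a) sc).contains x = true := by
      intro x hx
      rw [PySem.Dict.contains_iff_mem_keys, hk, ← PySem.Dict.contains_iff_mem_keys]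
      exact h x (List.mem_cons_of_mem _ hx)
    obtain ⟨ihk, ihg⟩ := ih _ h'
    refine ⟨by rw [List.foldl_cons, ihk, hk], ?_⟩
    intro k
    rw [List.foldl_cons, ihg k, hg k, List.count_cons]
    by_cases hk' : k = a
    · subst hk'; simp only [beq_self_eq_true, if_true]; push_cast; ring
    · have hne : (a == k) = false := beq_eq_false_iff_ne.mpr (fun h => hk' h.symm)
      simp only [if_neg hk', hne, Bool.false_eq_true, if_false]; push_cast; ring

theorem scores0_keys (options : List String) :
    ((options.foldl (fun d o => d.insert o 0) PySem.Dict.empty : PySem.Dict String Int)).keys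
      = PySem.Set.ofList options := by
  rw [PySem.Dict.keys_foldl_insert options (fun _ _ => 0), PySem.Dict.keys_empty,
    PySem.Set.update_nil_left]

theorem scores0_getD (options : List String) (k : String) :
    ((options.foldl (fun d o => d.insert o 0) PySem.Dict.empty : PySem.Dict String Int)).getD k 0 = 0 := by
  suffices h : ∀ (d : PySem.Dict String Int), (∀ k', d.getD k' 0 = 0) →
      ∀ k, (options.foldl (fun d o => d.insert o 0) d).getD k 0 = 0 by
    exact h _ (fun k' => PySem.Dict.getD_empty k' 0) k
  induction options with
  | nil => intro d hd k; simpa using hd k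
  | cons o l ih =>
    intro d hd k
    refine ih _ ?_ k
    intro k'
    rw [PySem.Dict.getD_insert]
    split_ifs <;> simp [hd]

theorem rank_fold (ballot : List String) (a : String) (d : Int) :
    ∀ (s : Int) (r0 : PySem.Dict String Int),
    ((PySem.List.enumerate ballot s).foldl
        (fun r p => if r.contains p.2 then r else r.insert p.2 p.1) r0).getD a d
      = if r0.contains a then r0.getD a d
        else if a ∈ ballot then s + (((PySem.List.index? ballot a).getD 0 : Nat) : Int)
        else d := by
  induction ballot with
  | nil =>
    intro s r0
    rw [PySem.List.enumerate_nil]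
    simp only [List.foldl_nil, List.not_mem_nil, if_false]
    by_cases hc : r0.contains a
    · simp [hc]
    · rw [Bool.not_eq_true] at hc
      simp [hc, PySem.Dict.getD_of_not_contains]
  | cons x rest ih =>
    intro s r0
    rw [PySem.List.enumerate_cons, List.foldl_cons]
    by_cases hax : a = x
    · subst hax
      by_cases hc : r0.contains a
      · simp only [hc, if_true]
        rw [ih (s + 1) r0]
        simp [hc]
      · rw [Bool.not_eq_true] at hc
        simp only [hc, Bool.false_eq_true, if_false]
        rw [ih (s + 1) (r0.insert a s)]
        rw [PySem.List.index?_cons_self]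
        simp [PySem.Dict.contains_insert, PySem.Dict.getD_insert, hc]
    · have key : ∀ r1 : PySem.Dict String Int,
          r1.contains a = r0.contains a → r1.getD a d = r0.getD a d →
          ((PySem.List.enumerate rest (s + 1)).foldl
              (fun r p => if r.contains p.2 then r else r.insert p.2 p.1) r1).getD a d
            = if r0.contains a then r0.getD a d
              else if a ∈ x :: rest then s + (((PySem.List.index? (x :: rest) a).getD 0 : Nat) : Int)
              else d := by
        intro r1 hcc hgg
        rw [ih (s + 1) r1, hcc, hgg]
        by_cases hca : r0.contains a
        · simp [hca]
        · rw [Bool.not_eq_true] at hca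
          simp only [hca, Bool.false_eq_true, if_false, List.mem_cons]
          by_cases hmem : a ∈ rest
          · obtain ⟨i, hi⟩ := Option.isSome_iff_exists.mp
              ((PySem.List.index?_isSome_iff rest a).mpr hmem)
            rw [PySem.List.index?_cons_of_ne rest (fun h => hax h.symm), hi]
            simp only [hmem, if_true, hax, false_or, Option.map_some, Option.getD_some]
            push_cast; ring
          · simp [hmem, hax]
      by_cases hc : r0.contains x
      · simp only [hc, if_true]
        exact key r0 rfl rfl
      · rw [Bool.not_eq_true] at hc
        simp only [hc, Bool.false_eq_true, if_false]
        refine key (r0.insert x s) ?_ ?_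
        · rw [PySem.Dict.contains_insert]
          simp [beq_eq_false_iff_ne.mpr hax]
        · rw [PySem.Dict.getD_insert]
          simp [hax]

theorem rank_getD (ballot : List String) (a : String) :
    (bRank ballot).getD a (ballot.length : Int) = (pidx ballot a : Int) := by
  rw [bRank, rank_fold]
  rw [PySem.Dict.contains_empty]
  simp only [Bool.false_eq_true, if_false, pidx]
  split_ifs <;> simp

theorem bInner_fold (rank : PySem.Dict String Int) (n : Int) (a : String) (ra : Int)
    (ys : List String) (w : PySem.Dict (String × String) Int) (c e : String) :
    (ys.foldl (bPairStep rank n a ra) w).getD (c, e) 0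
      = w.getD (c, e) 0 +
        (if c = a ∧ a ≠ e ∧ ra < rank.getD e n then (ys.count e : Int) else 0) := by
  induction ys generalizing w with
  | nil => simp
  | cons b ys ih =>
    have hstep : (bPairStep rank n a ra w b).getD (c, e) 0
        = w.getD (c, e) 0 + (if c = a ∧ e = b ∧ a ≠ b ∧ ra < rank.getD b n then 1 else 0) := by
      unfold bPairStep
      split_ifs with h1 h2 <;>
        simp_all [PySem.Dict.getD_insert, Prod.ext_iff] <;> tauto
    rw [List.foldl_cons, ih _, hstep, List.count_cons]
    by_cases heb : e = b
    · subst heb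
      simp only [beq_self_eq_true, if_true]
      split_ifs <;> simp_all <;> push_cast <;> omega
    · have hne : (b == e) = false := beq_eq_false_iff_ne.mpr (fun h => heb h.symm)
      simp only [heb, false_and, and_false, if_false, add_zero, hne, Bool.false_eq_true]

theorem bDouble_fold (rank : PySem.Dict String Int) (n : Int) (xs ys : List String)
    (w : PySem.Dict (String × String) Int) (c e : String) :
    (xs.foldl (fun w x => ys.foldl (bPairStep rank n x (rank.getD x n)) w) w).getD (c, e) 0
      = w.getD (c, e) 0 +
        (if c ≠ e ∧ rank.getD c n < rank.getD e n then (xs.count c : Int) * (ys.count e : Int) else 0) := by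
  induction xs generalizing w with
  | nil => simp
  | cons x xs ih =>
    rw [List.foldl_cons, ih _, bInner_fold rank n x (rank.getD x n) ys w c e, List.count_cons]
    by_cases hcx : c = x
    · subst hcx
      simp only [beq_self_eq_true, if_true]
      split_ifs <;> simp_all <;> push_cast <;> ring
    · have hne : (x == c) = false := beq_eq_false_iff_ne.mpr (fun h => hcx h.symm)
      simp only [hcx, false_and, if_false, add_zero, hne, Bool.false_eq_true]

theorem wins_getD (ballots : List (List String)) (options : List String)
    (a b : String) (hab : a ≠ b) :
    ∀ w, (ballots.foldl (bBallotStep options) w).getD (a, b) 0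
      = w.getD (a, b) 0 + (options.count a : Int) * (options.count b : Int) * (pcnt ballots a b : Int) := by
  induction ballots with
  | nil => intro w; simp [pcnt]
  | cons bal rest ih =>
    intro w
    rw [List.foldl_cons, ih _, pcnt_cons]
    unfold bBallotStep
    rw [bDouble_fold (bRank bal) (bal.length : Int) options options w a b]
    rw [rank_getD, rank_getD]
    simp only [hab, ne_eq, not_false_eq_true, true_and, Nat.cast_lt]
    push_cast
    split_ifs <;> ring

-- with both counts positive, B's matrix increment equals A's rescan increment
theorem bsgn_eq_sgn (ballots : List (List String)) (options : List String)
    (a b : String) (ha : a ∈ options) (hb : b ∈ options) (hab : a ≠ b) :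
    bsgn (ballots.foldl (bBallotStep options) PySem.Dict.empty) a b = sgn ballots a b := by
  have hwa := wins_getD ballots options a b hab PySem.Dict.empty
  have hwb := wins_getD ballots options b a (fun h => hab h.symm) PySem.Dict.empty
  have hca : 0 < (options.count a : Int) := by
    exact_mod_cast List.count_pos_iff.mpr ha
  have hcb : 0 < (options.count b : Int) := by
    exact_mod_cast List.count_pos_iff.mpr hb
  unfold bsgn sgn
  rw [hwa, hwb]
  simp only [PySem.Dict.getD_empty]
  have hflip : (options.count b : Int) * (options.count a : Int) * (pcnt ballots b a : Int)
      = (options.count a : Int) * (options.count b : Int) * (pcnt ballots b a : Int) := by ring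
  rw [hflip]
  have hP : 0 < (options.count a : Int) * (options.count b : Int) := mul_pos hca hcb
  have h1 : (0 + (options.count a : Int) * (options.count b : Int) * (pcnt ballots a b : Int)
      - (0 + (options.count a : Int) * (options.count b : Int) * (pcnt ballots b a : Int)) > 0)
      ↔ pcnt ballots b a < pcnt ballots a b := by
    constructor
    · intro h
      have h' : (options.count a : Int) * (options.count b : Int) * (pcnt ballots b a : Int)
          < (options.count a : Int) * (options.count b : Int) * (pcnt ballots a b : Int) := by linarith
      have h'' := lt_of_mul_lt_mul_left h' (le_of_lt hP)
      exact_mod_cast h''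
    · intro h
      have h' : (pcnt ballots b a : Int) < (pcnt ballots a b : Int) := by exact_mod_cast h
      have h'' := mul_lt_mul_of_pos_left h' hP
      linarith
  have h2 : (0 + (options.count a : Int) * (options.count b : Int) * (pcnt ballots a b : Int)
      - (0 + (options.count a : Int) * (options.count b : Int) * (pcnt ballots b a : Int)) < 0)
      ↔ pcnt ballots a b < pcnt ballots b a := by
    constructor
    · intro h
      have h' : (options.count a : Int) * (options.count b : Int) * (pcnt ballots a b : Int)
          < (options.count a : Int) * (options.count b : Int) * (pcnt ballots b a : Int) := by linarith
      have h'' := lt_of_mul_lt_mul_left h' (le_of_lt hP)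
      exact_mod_cast h''
    · intro h
      have h' : (pcnt ballots a b : Int) < (pcnt ballots b a : Int) := by exact_mod_cast h
      have h'' := mul_lt_mul_of_pos_left h' hP
      linarith
  rw [if_congr h1 rfl (if_congr h2 rfl rfl)]

theorem scores_eq (ballots : List (List String)) (options : List String) :
    aScores ballots options = bScores ballots options := by
  unfold aScores bScores
  set sc0 : PySem.Dict String Int := options.foldl (fun d o => d.insert o 0) PySem.Dict.empty with hsc0
  set wins : PySem.Dict (String × String) Int :=
    ballots.foldl (bBallotStep options) PySem.Dict.empty with hwins
  have hc0 : ∀ x ∈ options, sc0.contains x = true := by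
    intro x hx
    rw [PySem.Dict.contains_iff_mem_keys, hsc0, scores0_keys, PySem.Set.mem_ofList]
    exact hx
  obtain ⟨hkA, hgA⟩ := genOuter_fold (aInnerStep ballots) (sgn ballots) options
    (aInnerStep_keys ballots) (aInnerStep_getD ballots) options sc0 hc0
  obtain ⟨hkB, hgB⟩ := genOuter_fold (bScoreStep wins) (bsgn wins) options
    (bScoreStep_keys wins) (bScoreStep_getD wins) options sc0 hc0
  have hnd : (PySem.Set.ofList options).Nodup := PySem.Set.nodup_ofList options
  apply PySem.Dict.ext
  rw [PySem.Dict.items_eq_map_keys _ (by rw [hkA, hsc0, scores0_keys]; exact hnd) 0,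
    PySem.Dict.items_eq_map_keys _ (by rw [hkB, hsc0, scores0_keys]; exact hnd) 0]
  rw [hkA, hkB, hsc0, scores0_keys]
  refine List.map_congr_left ?_
  intro a haS
  have haO : a ∈ options := by rwa [PySem.Set.mem_ofList] at haS
  refine Prod.ext rfl ?_
  have hsum : List.map (sgn ballots a) (List.filter (fun b => decide (b ≠ a)) options)
      = List.map (bsgn wins a) (List.filter (fun b => decide (b ≠ a)) options) := by
    refine List.map_congr_left ?_
    intro b hbf
    have hbO : b ∈ options := (List.mem_filter.mp hbf).1
    have hba : b ≠ a := by simpa using (List.mem_filter.mp hbf).2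
    exact (bsgn_eq_sgn ballots options a b haO hbO (fun h => hba h.symm)).symm
  rw [hgA a, hgB a, hsc0, scores0_getD, hsum]

theorem copeland_eq_alt (ballots : List (List String)) (options : List String) :
    copeland ballots options = copeland_alt ballots options := by
  simp only [copeland, copeland_alt, scores_eq]

-- ===== VERDICT (by name: the statement is the Claim_ definition above) =====
theorem copeland_spec : Claim_equal_copeland := by
  intro ballots options _
  unfold Spec_copeland
  exact copeland_eq_alt ballots options
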